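-- pv_equiv track=rewrite | github.com/cheng1559/nlp | week1/src/cws_lab/data.py | sentence_to_bmes
-- ===== SOURCE A (Python) =====
-- from typing import Iterable, Iterator, List, Sequence, Tuple
--
-- LABEL_TO_ID = {"B": 0, "M": 1, "E": 2, "S": 3}
--
-- def sentence_to_bmes(words: Sequence[str]) -> Tuple[List[str], List[int]]:
--     chars: List[str] = []
--     labels: List[int] = []
--     for word in words:
--         if len(word) == 0:
--             continue
--         if len(word) == 1:
--             chars.append(word)
--             labels.append(LABEL_TO_ID["S"])
--         else:
--             chars.extend(list(word))
--             labels.extend([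
--                 LABEL_TO_ID["B"],
--                 *([LABEL_TO_ID["M"]] * (len(word) - 2)),
--                 LABEL_TO_ID["E"],
--             ])
--     return chars, labels
-- ===== SOURCE B (Python) =====
-- LABEL_TO_ID = {"B": 0, "M": 1, "E": 2, "S": 3}
--
-- def sentence_to_bmes(words):
--     chars = []
--     labels = []
--     for word in words:
--         n = len(word)
--         for i, ch in enumerate(word):
--             chars.append(ch)
--             if n == 1:
--                 labels.append(LABEL_TO_ID["S"])
--             elif i == 0:
--                 labels.append(LABEL_TO_ID["B"])
--             elif i == n - 1:
--                 labels.append(LABEL_TO_ID["E"])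
--             else:
--                 labels.append(LABEL_TO_ID["M"])
--     return chars, labels
-- ===== Notes on version B (the rewrite author's own statement) =====
-- stated objective: simpler
-- what changed: Replaces A's per-word length-branching and list-multiplication chunk construction with a uniform per-character enumerate scan that decides each label from its position.
import Mathlib
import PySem

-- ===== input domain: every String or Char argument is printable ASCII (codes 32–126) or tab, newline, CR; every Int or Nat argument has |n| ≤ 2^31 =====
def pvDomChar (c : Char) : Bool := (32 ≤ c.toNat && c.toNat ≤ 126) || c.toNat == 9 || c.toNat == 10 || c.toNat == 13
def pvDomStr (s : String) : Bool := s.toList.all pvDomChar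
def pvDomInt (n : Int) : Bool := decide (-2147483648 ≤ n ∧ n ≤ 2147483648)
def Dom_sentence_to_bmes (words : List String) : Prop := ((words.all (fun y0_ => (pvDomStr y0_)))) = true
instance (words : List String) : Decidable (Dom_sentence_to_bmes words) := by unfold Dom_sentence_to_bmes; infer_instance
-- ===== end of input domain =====

-- B replaces A's per-word length-branch + list-multiplication chunk build by a uniform
-- per-character enumerate scan computing each label from its position (objective: simpler).


-- ===== PORT A =====
def sentence_to_bmes (words : List String) : List String × List Int :=
  words.foldl (fun acc word =>
    let cs := word.toList
    if cs.length = 0 then acc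
    else if cs.length = 1 then (acc.1 ++ [word], acc.2 ++ [3])
    else (acc.1 ++ cs.map (fun c => String.ofList [c]),
          acc.2 ++ ([0] ++ List.replicate (cs.length - 2) 1 ++ [2])))
    ([], [])

-- ===== PORT B =====
def sentence_to_bmes_alt (words : List String) : List String × List Int :=
  words.foldl (fun acc word =>
    let cs := word.toList
    let n : Int := cs.length
    (PySem.List.enumerate cs).foldl (fun acc2 p =>
      (acc2.1 ++ [String.ofList [p.2]],
       acc2.2 ++ [if n = 1 then 3 else if p.1 = 0 then 0 else if p.1 = n - 1 then 2 else 1]))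
      acc)
    ([], [])

-- ===== PRECONDITION & SPEC =====
def Spec_sentence_to_bmes (words : List String) (out : List String × List Int) : Prop := out = sentence_to_bmes_alt words
instance (words : List String) (out : List String × List Int) : Decidable (Spec_sentence_to_bmes words out) := by unfold Spec_sentence_to_bmes; infer_instance

-- ===== CLAIM (what is proved, stated in full; the proofs are below) =====
def Claim_equal_sentence_to_bmes : Prop := ∀ (words : List String), Dom_sentence_to_bmes words → Spec_sentence_to_bmes words (sentence_to_bmes words)

-- ===== LEMMAS AND PROOFS =====

-- the inner per-character foldl of B appends, to each accumulator component, a map over the enumerated list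
theorem inner_foldl_eq {f : Int × Char → String} {g : Int × Char → Int}
    (l : List (Int × Char)) (acc : List String × List Int) :
    l.foldl (fun acc2 p => (acc2.1 ++ [f p], acc2.2 ++ [g p])) acc
      = (acc.1 ++ l.map f, acc.2 ++ l.map g) := by
  induction l generalizing acc with
  | nil => simp
  | cons p t ih => simp [List.foldl, ih]

-- label map over the tail of an enumerated multi-char word
theorem label_tail (n : Int) (l : List Char) (j : Int) (hj : 1 ≤ j) (hl : l ≠ [])
    (hn : j + l.length = n) :
    (PySem.List.enumerate l j).map
        (fun p => if n = 1 then (3 : Int) else if p.1 = 0 then 0 else if p.1 = n - 1 then 2 else 1)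
      = List.replicate (l.length - 1) 1 ++ [2] := by
  induction l generalizing j with
  | nil => exact absurd rfl hl
  | cons c t ih =>
    have hn1 : n ≠ 1 := by simp at hn; omega
    have hj0 : j ≠ 0 := by omega
    rcases t with _ | ⟨c2, t2⟩
    · have hje : j = n - 1 := by simp at hn; omega
      have hne : n - 1 ≠ 0 := by omega
      simp [PySem.List.enumerate_cons, PySem.List.enumerate_nil, hn1, hje, hne]
    · have hjne : j ≠ n - 1 := by simp at hn; omega
      have h := ih (j + 1) (by omega) (by simp) (by simp at hn ⊢; omega)
      rw [PySem.List.enumerate_cons, List.map_cons, h]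
      simp [hn1, hj0, hjne, List.replicate_succ]

-- the characters produced by B\'s enumerate scan are A\'s per-character strings
theorem chars_map (cs : List Char) (s : Int) :
    (PySem.List.enumerate cs s).map (fun p => String.ofList [p.2])
      = cs.map (fun c => String.ofList [c]) := by
  conv_rhs => rw [← PySem.List.map_snd_enumerate cs s]
  rw [List.map_map]
  rfl

-- per-word step equality between A's chunk build and B's per-character scan
theorem step_eq (acc : List String × List Int) (word : String) :
    (let cs := word.toList
     if cs.length = 0 then acc
     else if cs.length = 1 then (acc.1 ++ [word], acc.2 ++ [3])
     else (acc.1 ++ cs.map (fun c => String.ofList [c]),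
           acc.2 ++ ([0] ++ List.replicate (cs.length - 2) 1 ++ [(2 : Int)])))
      = (let cs := word.toList
         let n : Int := cs.length
         (PySem.List.enumerate cs).foldl (fun acc2 p =>
           (acc2.1 ++ [String.ofList [p.2]],
            acc2.2 ++ [if n = 1 then 3 else if p.1 = 0 then 0 else if p.1 = n - 1 then 2 else 1]))
           acc) := by
  simp only []
  rw [inner_foldl_eq]
  rcases hcs : word.toList with _ | ⟨c, t⟩
  · simp [PySem.List.enumerate_nil]
  · rcases t with _ | ⟨c2, t2⟩
    · have hw := congrArg String.ofList hcs
      rw [String.ofList_toList] at hw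
      simp [PySem.List.enumerate_cons, PySem.List.enumerate_nil, hw]
    · have hne0 : (c :: c2 :: t2).length ≠ 0 := by simp
      have hne1 : (c :: c2 :: t2).length ≠ 1 := by simp
      simp only [hne0, hne1, if_false]
      refine Prod.ext ?_ ?_
      · simp [PySem.List.enumerate_cons, chars_map]
      · simp only []
        congr 1
        have hn1 : ((c :: c2 :: t2).length : Int) ≠ 1 := by simp; omega
        have htail := label_tail ((c :: c2 :: t2).length : Int) (c2 :: t2) 1 le_rfl (by simp)
          (by simp; omega)
        rw [PySem.List.enumerate_cons, List.map_cons, show (0:Int)+1 = 1 from rfl, htail]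
        simp
        omega

theorem fold_eq (words : List String) (acc : List String × List Int) :
    words.foldl (fun acc word =>
      let cs := word.toList
      if cs.length = 0 then acc
      else if cs.length = 1 then (acc.1 ++ [word], acc.2 ++ [3])
      else (acc.1 ++ cs.map (fun c => String.ofList [c]),
            acc.2 ++ ([0] ++ List.replicate (cs.length - 2) 1 ++ [2]))) acc
    = words.foldl (fun acc word =>
      let cs := word.toList
      let n : Int := cs.length
      (PySem.List.enumerate cs).foldl (fun acc2 p =>
        (acc2.1 ++ [String.ofList [p.2]],
         acc2.2 ++ [if n = 1 then 3 else if p.1 = 0 then 0 else if p.1 = n - 1 then 2 else 1]))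
        acc) acc := by
  induction words generalizing acc with
  | nil => rfl
  | cons w t ih =>
    simp only [List.foldl]
    rw [step_eq acc w, ih]

-- ===== VERDICT (by name: the statement is the Claim_ definition above) =====
theorem sentence_to_bmes_spec : Claim_equal_sentence_to_bmes := by
  intro words _
  unfold Spec_sentence_to_bmes sentence_to_bmes sentence_to_bmes_alt
  exact fold_eq words ([], [])
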